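-- pv_equiv track=rewrite | github.com/dev-Junyong/Algorithm-study | BOJ/2021.12/BOJ_3085(사탕 게임).py | check
-- ===== SOURCE A (Python) =====
-- def check(arr, row_s, row_e, col_s, col_e):
--     n = len(arr)
--     res = 1
--
--     for r in range(row_s, row_e+1):
--         cnt = 1
--         for c in range(1, n):
--             if arr[r][c-1] == arr[r][c]:
--                 cnt += 1
--             else:
--                 cnt = 1
--             if cnt > res:
--                 res = cnt
--     for r in range(col_s, col_e+1):
--         cnt = 1
--         for c in range(1, n):
--             if arr[c-1][r] == arr[c][r]:
--                 cnt += 1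
--             else:
--                 cnt = 1
--             if cnt > res:
--                 res = cnt
--     return res
-- ===== SOURCE B (Python) =====
-- def longest_run(xs):
--     # length of the longest block of equal adjacent elements, by run-skipping
--     best = 0
--     while xs:
--         k = 1
--         while k < len(xs) and xs[k] == xs[0]:
--             k += 1
--         best = max(best, k)
--         xs = xs[k:]
--     return best
--
--
-- def check(arr, row_s, row_e, col_s, col_e):
--     n = len(arr)
--     best = 1
--     if n > 0:
--         for r in range(row_s, row_e + 1):
--             best = max(best, longest_run(arr[r][:n]))
--         for r in range(col_s, col_e + 1):
--             best = max(best, longest_run([arr[i][r] for i in range(n)]))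
--     return best
-- ===== Notes on version B (the rewrite author's own statement) =====
-- stated objective: alternative
-- what changed: B materializes each scanned row/column as a list and computes its longest equal run with a separate run-skipping helper (jump to the end of each block of equal values), folding the maxima into a running best, instead of A's fused index-arithmetic double loops with a streaming cnt/res pair.
-- outside the precondition, e.g. on check([['a']], 1, 1, 0, 0): A returns 1, B raises IndexError; on check([['a']], 0, 0, 1, 1): A returns 1, B raises IndexError; on check([[]], 0, 0, 1, 0): A returns 1, B returns 1
import Mathlib
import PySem

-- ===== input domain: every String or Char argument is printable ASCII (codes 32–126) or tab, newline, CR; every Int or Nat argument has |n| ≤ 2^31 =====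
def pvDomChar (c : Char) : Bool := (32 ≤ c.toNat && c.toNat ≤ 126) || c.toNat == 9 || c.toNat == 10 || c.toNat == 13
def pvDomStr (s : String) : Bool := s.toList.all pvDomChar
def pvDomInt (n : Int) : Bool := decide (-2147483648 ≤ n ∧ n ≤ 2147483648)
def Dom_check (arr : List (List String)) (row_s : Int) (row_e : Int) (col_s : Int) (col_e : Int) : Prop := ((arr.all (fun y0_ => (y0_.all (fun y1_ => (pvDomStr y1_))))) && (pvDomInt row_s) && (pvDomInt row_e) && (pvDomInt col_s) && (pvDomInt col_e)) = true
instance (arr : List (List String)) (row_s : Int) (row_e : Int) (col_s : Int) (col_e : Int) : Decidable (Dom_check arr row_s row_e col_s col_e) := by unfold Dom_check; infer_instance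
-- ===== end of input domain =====

-- B re-implements the candy-run scan by a different decomposition: it materializes each scanned
-- row/column as a list and computes its longest equal run by run-skipping, folding a running max;
-- objective: alternative (same asymptotic cost).


-- ===== PORT A =====
def check (arr : List (List String)) (row_s : Int) (row_e : Int) (col_s : Int) (col_e : Int) : Int :=
  let n : Int := PySem.List.len arr
  let res : Int :=
    (PySem.List.pyRange row_s (row_e + 1) 1).foldl (fun res r =>
      ((PySem.List.pyRange 1 n 1).foldl (fun (s : Int × Int) c =>
          let cnt : Int := if PySem.List.pyGetD (PySem.List.pyGetD arr r []) (c - 1) "" =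
                              PySem.List.pyGetD (PySem.List.pyGetD arr r []) c "" then s.1 + 1 else 1
          (cnt, if cnt > s.2 then cnt else s.2)) (1, res)).2) 1
  (PySem.List.pyRange col_s (col_e + 1) 1).foldl (fun res r =>
    ((PySem.List.pyRange 1 n 1).foldl (fun (s : Int × Int) c =>
        let cnt : Int := if PySem.List.pyGetD (PySem.List.pyGetD arr (c - 1) []) r "" =
                            PySem.List.pyGetD (PySem.List.pyGetD arr c []) r "" then s.1 + 1 else 1
        (cnt, if cnt > s.2 then cnt else s.2)) (1, res)).2) res

-- ===== PORT B =====
-- inner while loop of longest_run: how many leading elements of t equal h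
def lrun_while (h : String) : List String → Int
  | [] => 0
  | x :: t => if x = h then 1 + lrun_while h t else 0

-- needed by lrun_go's termination argument
theorem lrun_while_nonneg (h : String) (t : List String) : 0 ≤ lrun_while h t := by
  induction t with
  | nil => simp [lrun_while]
  | cons x t ih => by_cases hx : x = h <;> simp [lrun_while, hx] <;> omega

-- outer while loop of longest_run (xs[k:] is List.drop k.toNat: k ≥ 1 here)
def lrun_go : List String → Int → Int
  | [], best => best
  | x :: t, best =>
      let k : Int := 1 + lrun_while x t
      lrun_go (List.drop k.toNat (x :: t)) (max best k)
termination_by xs _ => xs.length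
decreasing_by
  have := lrun_while_nonneg x t
  simp [List.length_drop]
  omega

def longest_run (xs : List String) : Int := lrun_go xs 0

def check_alt (arr : List (List String)) (row_s : Int) (row_e : Int) (col_s : Int) (col_e : Int) : Int :=
  let n : Int := PySem.List.len arr
  let best : Int := 1
  if 0 < n then
    let best :=
      (PySem.List.pyRange row_s (row_e + 1) 1).foldl (fun best r =>
        max best (longest_run (PySem.List.slice (PySem.List.pyGetD arr r []) none (some n)))) best
    (PySem.List.pyRange col_s (col_e + 1) 1).foldl (fun best r =>
      max best (longest_run ((PySem.List.pyRange 0 n 1).map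
        (fun i => PySem.List.pyGetD (PySem.List.pyGetD arr i []) r "")))) best
  else best

-- ===== PRECONDITION & SPEC =====
-- Pre_ excludes inputs where a scanned index is invalid (row index out of range, scanned row
-- shorter than n, or column index out of range in some row): there Python A raises IndexError,
-- except when n ≤ 1, where A's empty inner loop never indexes the board and returns 1 while B,
-- which materializes each scanned row/column, raises (or, for a too-short row at n = 1, agrees).
def Pre_check (arr : List (List String)) (row_s : Int) (row_e : Int) (col_s : Int) (col_e : Int) : Prop :=
  arr = [] ∨
  ((row_e < row_s ∨ (-(arr.length : Int) ≤ row_s ∧ row_e < (arr.length : Int))) ∧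
   (∀ r ∈ PySem.List.pyRange (-(arr.length : Int)) ((arr.length : Int)) 1,
      row_s ≤ r → r ≤ row_e → arr.length ≤ (PySem.List.pyGetD arr r []).length) ∧
   (col_e < col_s ∨ (∀ i ∈ PySem.List.pyRange 0 ((arr.length : Int)) 1,
      -(((PySem.List.pyGetD arr i ([] : List String)).length : Int)) ≤ col_s ∧
        col_e < ((PySem.List.pyGetD arr i ([] : List String)).length : Int))))
instance (arr : List (List String)) (row_s : Int) (row_e : Int) (col_s : Int) (col_e : Int) : Decidable (Pre_check arr row_s row_e col_s col_e) := by unfold Pre_check; infer_instance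

def pvWitness_check : List (List String) × Int × Int × Int × Int :=
  ([["a", "b"], ["b", "b"]], 0, 1, 0, 1)

def Spec_check (arr : List (List String)) (row_s : Int) (row_e : Int) (col_s : Int) (col_e : Int) (out : Int) : Prop := out = check_alt arr row_s row_e col_s col_e
instance (arr : List (List String)) (row_s : Int) (row_e : Int) (col_s : Int) (col_e : Int) (out : Int) : Decidable (Spec_check arr row_s row_e col_s col_e out) := by unfold Spec_check; infer_instance

-- ===== CLAIM (what is proved, stated in full; the proofs are below) =====
def Claim_equal_check : Prop := ∀ (arr : List (List String)) (row_s : Int) (row_e : Int) (col_s : Int) (col_e : Int), Dom_check arr row_s row_e col_s col_e → Pre_check arr row_s row_e col_s col_e → Spec_check arr row_s row_e col_s col_e (check arr row_s row_e col_s col_e)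

-- ===== LEMMAS AND PROOFS =====

-- A's inner-loop body, with the string comparison abstracted into a Bool
def stepB (s : Int × Int) (t : Bool) : Int × Int :=
  let cnt : Int := if t then s.1 + 1 else 1
  (cnt, if cnt > s.2 then cnt else s.2)

-- adjacent-equality flags of a line
def flags : List String → List Bool
  | x :: y :: t => decide (x = y) :: flags (y :: t)
  | _ => []

-- max count recorded while scanning flags with current run length c (floored at 1)
def S : Int → List Bool → Int
  | _, [] => 1
  | c, t :: b => let c' : Int := if t then c + 1 else 1; max c' (S c' b)

theorem S_pos (b : List Bool) (c : Int) : 1 ≤ S c b := by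
  induction b generalizing c with
  | nil => simp [S]
  | cons t b ih => simp only [S]; have := ih (if t then c + 1 else 1); omega

theorem foldl_stepB_eq (b : List Bool) (c r : Int) (hc : 0 ≤ c) (hr : 1 ≤ r) :
    (b.foldl stepB (c, r)).2 = max r (S c b) := by
  induction b generalizing c r with
  | nil => simp [S]; omega
  | cons t b ih =>
      simp only [List.foldl_cons, S]
      have h1 : stepB (c, r) t = (if t then c + 1 else 1, max r (if t then c + 1 else 1)) := by
        simp only [stepB, Prod.mk.injEq, true_and]
        split <;> omega
      rw [h1, ih _ _ (by omega) (by omega)]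
      omega

theorem flags_append_last (l : List String) (a z : String) :
    flags ((l ++ [a]) ++ [z]) = flags (l ++ [a]) ++ [decide (a = z)] := by
  induction l with
  | nil => simp [flags]
  | cons x l ih =>
      cases l with
      | nil => simp [flags]
      | cons y l' => simpa [flags] using ih

theorem flags_map_range (g : Int → String) (n : Nat) :
    (PySem.List.pyRange 1 (n : Int) 1).map (fun c => decide (g (c - 1) = g c))
      = flags ((PySem.List.pyRange 0 (n : Int) 1).map g) := by
  induction n with
  | zero => simp [PySem.List.pyRange_one_eq_nil, flags]
  | succ m ih =>
      cases m with
      | zero =>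
          have h1 : PySem.List.pyRange 1 (1 : Int) 1 = [] := PySem.List.pyRange_one_eq_nil (by omega)
          have h2 : PySem.List.pyRange 0 (1 : Int) 1 = [0] := by
            simpa using PySem.List.pyRange_one_singleton (a := (0 : Int))
          simp [h1, h2, flags]
      | succ k =>
          have hmm : (1 : Int) ≤ (k + 1 : Nat) := by push_cast; omega
          have h0 : (0 : Int) ≤ (k + 1 : Nat) := by positivity
          have hc : ((k + 1 + 1 : Nat) : Int) = ((k + 1 : Nat) : Int) + 1 := by push_cast; ring
          rw [hc, PySem.List.pyRange_one_succ_right hmm, PySem.List.pyRange_one_succ_right h0,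
            List.map_append, List.map_append, ih]
          have hsplit : PySem.List.pyRange 0 ((k + 1 : Nat) : Int) 1
              = PySem.List.pyRange 0 ((k : Nat) : Int) 1 ++ [((k : Nat) : Int)] := by
            have : ((k + 1 : Nat) : Int) = ((k : Nat) : Int) + 1 := by push_cast; ring
            rw [this, PySem.List.pyRange_one_succ_right (by positivity)]
          rw [hsplit, List.map_append]
          simp only [List.map_cons, List.map_nil]
          rw [flags_append_last]
          have h3 : ((k + 1 : Nat) : Int) - 1 = ((k : Nat) : Int) := by push_cast; ring
          simp [h3]

theorem take_eq_map_range (row : List String) (n : Nat) (h : n ≤ row.length) :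
    row.take n = (PySem.List.pyRange 0 (n : Int) 1).map (fun i => PySem.List.pyGetD row i "") := by
  apply List.ext_getElem?
  intro k
  by_cases hk : k < n
  · rw [PySem.List.getElem?_map_pyRange_zero (fun i => PySem.List.pyGetD row i "") n k hk]
    have hg : PySem.List.pyGetD row ((k : Nat) : Int) "" = row.getD k "" := by
      simp [PySem.List.pyGetD_natCast]
    rw [hg, List.getElem?_take]
    simp only [hk, if_pos]
    rw [List.getElem?_eq_getElem (show k < row.length by omega)]
    simp [List.getD_eq_getElem?_getD, List.getElem?_eq_getElem (show k < row.length by omega)]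
  · have h1 : (row.take n)[k]? = none := by
      rw [List.getElem?_eq_none_iff]; simp; omega
    have h2 : ((PySem.List.pyRange 0 (n : Int) 1).map (fun i => PySem.List.pyGetD row i ""))[k]? = none := by
      rw [List.getElem?_eq_none_iff]; simp [PySem.List.length_pyRange_one]; omega
    rw [h1, h2]

-- S on a line, decomposed at its leading run (matches lrun_go's recursion)
theorem S_flags_cons (t : List String) : ∀ (x : String) (c : Int), 1 ≤ c →
    S c (flags (x :: t)) = if lrun_while x t = 0 then S 1 (flags t)
      else max (c + lrun_while x t) (S 1 (flags (List.drop (lrun_while x t).toNat t))) := by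
  induction t with
  | nil => intro x c hc; simp [flags, lrun_while, S]
  | cons y t' ih =>
      intro x c hc
      by_cases hxy : x = y
      · subst hxy
        have hw := lrun_while_nonneg x t'
        have hl : lrun_while x (x :: t') = 1 + lrun_while x t' := by simp [lrun_while]
        have hf : flags (x :: x :: t') = true :: flags (x :: t') := by simp [flags]
        rw [hf, hl, if_neg (show ¬ (1 + lrun_while x t' = 0) by omega)]
        have hst : S c (true :: flags (x :: t')) = max (c + 1) (S (c + 1) (flags (x :: t'))) := by
          simp [S]
        rw [hst, ih x (c + 1) (by omega)]
        have hdt : (1 + lrun_while x t').toNat = (lrun_while x t').toNat + 1 := by omega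
        rw [hdt, List.drop_succ_cons]
        by_cases h0 : lrun_while x t' = 0
        · simp only [h0, if_pos rfl, Int.toNat_zero, List.drop_zero]
          have := S_pos (flags t') 1
          omega
        · rw [if_neg h0]
          have := S_pos (flags (List.drop (lrun_while x t').toNat t')) 1
          omega
      · have hyx : ¬ (y = x) := fun h => hxy h.symm
        have hS2 := S_pos (flags (y :: t')) 1
        have hl : lrun_while x (y :: t') = 0 := by simp [lrun_while, hyx]
        have hf : flags (x :: y :: t') = false :: flags (y :: t') := by
          simp [flags, hxy]
        rw [hf, hl, if_pos rfl]
        have hst : S c (false :: flags (y :: t')) = max 1 (S 1 (flags (y :: t'))) := by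
          simp [S]
        rw [hst]
        omega

-- run-skipping computes the same per-line maximum as the streaming scan
theorem lrun_go_eq (xs : List String) (best : Int) :
    lrun_go xs best = if xs = [] then best else max best (S 1 (flags xs)) := by
  induction xs, best using lrun_go.induct with
  | case1 best => simp [lrun_go]
  | case2 x t best k ih =>
      rw [lrun_go]
      show lrun_go (List.drop (1 + lrun_while x t).toNat (x :: t)) (max best (1 + lrun_while x t)) = _
      have hk : k = 1 + lrun_while x t := rfl
      rw [hk] at ih
      have hw := lrun_while_nonneg x t
      have hdrop : List.drop (1 + lrun_while x t).toNat (x :: t) = List.drop (lrun_while x t).toNat t := by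
        have h1 : (1 + lrun_while x t).toNat = (lrun_while x t).toNat + 1 := by omega
        rw [h1, List.drop_succ_cons]
      rw [hdrop] at ih ⊢
      rw [ih]
      rw [S_flags_cons t x 1 le_rfl]
      have hS := S_pos (flags (List.drop (lrun_while x t).toNat t)) 1
      have hS2 := S_pos (flags t) 1
      have hfn : S 1 (flags ([] : List String)) = 1 := by simp [flags, S]
      rw [if_neg (List.cons_ne_nil x t)]
      by_cases h0 : lrun_while x t = 0
      · rw [if_pos h0]
        rw [h0] at hS ⊢
        simp only [Int.toNat_zero, List.drop_zero] at hS ⊢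
        by_cases ht : t = []
        · subst ht
          rw [if_pos rfl, hfn]
          omega
        · rw [if_neg ht]
          omega
      · rw [if_neg h0]
        by_cases hd : List.drop (lrun_while x t).toNat t = []
        · rw [if_pos hd]
          rw [hd] at hS ⊢
          rw [hfn]
          omega
        · rw [if_neg hd]
          omega

-- A's inner loop over a line, via the flag list
theorem innerA_eq (g : Int → String) (n : Nat) (res : Int) (hres : 1 ≤ res) :
    ((PySem.List.pyRange 1 (n : Int) 1).foldl (fun (s : Int × Int) c =>
        let cnt : Int := if g (c - 1) = g c then s.1 + 1 else 1
        (cnt, if cnt > s.2 then cnt else s.2)) (1, res)).2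
      = max res (S 1 (flags ((PySem.List.pyRange 0 (n : Int) 1).map g))) := by
  have hbody : (fun (s : Int × Int) c =>
      let cnt : Int := if g (c - 1) = g c then s.1 + 1 else 1
      (cnt, if cnt > s.2 then cnt else s.2))
      = fun (s : Int × Int) c => stepB s (decide (g (c - 1) = g c)) := by
    funext s c
    by_cases h : g (c - 1) = g c <;> simp [stepB, h]
  rw [hbody, ← List.foldl_map, flags_map_range g n, foldl_stepB_eq _ 1 res (by omega) hres]

-- fold congruence under an invariant 1 ≤ acc
theorem foldl_congr_inv (l : List Int) (F H : Int → Int → Int) (a : Int) (ha : 1 ≤ a)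
    (hFH : ∀ acc r, r ∈ l → 1 ≤ acc → F acc r = H acc r)
    (hH : ∀ acc r, 1 ≤ acc → 1 ≤ H acc r) :
    l.foldl F a = l.foldl H a := by
  induction l generalizing a with
  | nil => rfl
  | cons x l ih =>
      simp only [List.foldl_cons]
      rw [hFH a x (by simp) ha]
      exact ih _ (hH a x ha) (fun acc r hr h1 => hFH acc r (by simp [hr]) h1)

theorem foldl_inv (l : List Int) (H : Int → Int → Int) (a : Int) (ha : 1 ≤ a)
    (hH : ∀ acc r, 1 ≤ acc → 1 ≤ H acc r) : 1 ≤ l.foldl H a := by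
  induction l generalizing a with
  | nil => exact ha
  | cons x l ih => exact ih _ (hH a x ha)

theorem foldl_id (l : List Int) (a : Int) : l.foldl (fun acc _ => acc) a = a := by
  induction l generalizing a with
  | nil => rfl
  | cons x l ih => simpa using ih a

-- ===== VERDICT (by name: the statement is the Claim_ definition above) =====
-- per-scanned-line value shared by both characterizations
def lineVal (line : List String) : Int := S 1 (flags line)

def Hrow (arr : List (List String)) (acc r : Int) : Int :=
  max acc (lineVal ((PySem.List.pyRange 0 ((arr.length : Int)) 1).map
    (fun i => PySem.List.pyGetD (PySem.List.pyGetD arr r []) i "")))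

def Hcol (arr : List (List String)) (acc r : Int) : Int :=
  max acc (lineVal ((PySem.List.pyRange 0 ((arr.length : Int)) 1).map
    (fun i => PySem.List.pyGetD (PySem.List.pyGetD arr i []) r "")))

theorem Hrow_inv (arr : List (List String)) : ∀ acc r, 1 ≤ acc → 1 ≤ Hrow arr acc r :=
  fun acc r h => le_trans h (le_max_left _ _)

theorem Hcol_inv (arr : List (List String)) : ∀ acc r, 1 ≤ acc → 1 ≤ Hcol arr acc r :=
  fun acc r h => le_trans h (le_max_left _ _)

theorem checkA_char (arr : List (List String)) (row_s row_e col_s col_e : Int) :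
    check arr row_s row_e col_s col_e
      = (PySem.List.pyRange col_s (col_e + 1) 1).foldl (Hcol arr)
          ((PySem.List.pyRange row_s (row_e + 1) 1).foldl (Hrow arr) 1) := by
  unfold check
  simp only [PySem.List.len_eq]
  have h1 := foldl_congr_inv (PySem.List.pyRange row_s (row_e + 1) 1)
    (fun res r => ((PySem.List.pyRange 1 ((arr.length : Int)) 1).foldl (fun (s : Int × Int) c =>
        (if PySem.List.pyGetD (PySem.List.pyGetD arr r []) (c - 1) "" =
              PySem.List.pyGetD (PySem.List.pyGetD arr r []) c "" then s.1 + 1 else 1,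
         if (if PySem.List.pyGetD (PySem.List.pyGetD arr r []) (c - 1) "" =
                  PySem.List.pyGetD (PySem.List.pyGetD arr r []) c "" then s.1 + 1 else 1) > s.2 then
           (if PySem.List.pyGetD (PySem.List.pyGetD arr r []) (c - 1) "" =
                PySem.List.pyGetD (PySem.List.pyGetD arr r []) c "" then s.1 + 1 else 1)
         else s.2)) (1, res)).2)
    (Hrow arr) 1 le_rfl
    (fun acc r _ hacc =>
      innerA_eq (fun c => PySem.List.pyGetD (PySem.List.pyGetD arr r []) c "") arr.length acc hacc)
    (Hrow_inv arr)
  rw [h1]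
  have hm : 1 ≤ (PySem.List.pyRange row_s (row_e + 1) 1).foldl (Hrow arr) 1 :=
    foldl_inv _ _ 1 le_rfl (Hrow_inv arr)
  have h2 := foldl_congr_inv (PySem.List.pyRange col_s (col_e + 1) 1)
    (fun res r => ((PySem.List.pyRange 1 ((arr.length : Int)) 1).foldl (fun (s : Int × Int) c =>
        (if PySem.List.pyGetD (PySem.List.pyGetD arr (c - 1) []) r "" =
              PySem.List.pyGetD (PySem.List.pyGetD arr c []) r "" then s.1 + 1 else 1,
         if (if PySem.List.pyGetD (PySem.List.pyGetD arr (c - 1) []) r "" =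
                  PySem.List.pyGetD (PySem.List.pyGetD arr c []) r "" then s.1 + 1 else 1) > s.2 then
           (if PySem.List.pyGetD (PySem.List.pyGetD arr (c - 1) []) r "" =
                PySem.List.pyGetD (PySem.List.pyGetD arr c []) r "" then s.1 + 1 else 1)
         else s.2)) (1, res)).2)
    (Hcol arr) _ hm
    (fun acc r _ hacc =>
      innerA_eq (fun c => PySem.List.pyGetD (PySem.List.pyGetD arr c []) r "") arr.length acc hacc)
    (Hcol_inv arr)
  rw [h2]

theorem B_row_step (arr : List (List String)) (r : Int) (hn : 0 < arr.length)
    (hlen : arr.length ≤ (PySem.List.pyGetD arr r []).length) (acc : Int) :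
    max acc (longest_run (PySem.List.slice (PySem.List.pyGetD arr r []) none (some (arr.length : Int))))
      = Hrow arr acc r := by
  rw [PySem.List.slice_to_natCast, take_eq_map_range _ _ hlen]
  have hne : ((PySem.List.pyRange 0 ((arr.length : Int)) 1).map
      (fun i => PySem.List.pyGetD (PySem.List.pyGetD arr r []) i "")) ≠ [] := by
    apply List.ne_nil_of_length_pos
    simp [PySem.List.length_pyRange_one]
    omega
  unfold longest_run Hrow lineVal
  rw [lrun_go_eq, if_neg hne]
  have := S_pos (flags ((PySem.List.pyRange 0 ((arr.length : Int)) 1).map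
      (fun i => PySem.List.pyGetD (PySem.List.pyGetD arr r []) i ""))) 1
  omega

theorem B_col_step (arr : List (List String)) (r : Int) (hn : 0 < arr.length) (acc : Int) :
    max acc (longest_run ((PySem.List.pyRange 0 ((arr.length : Int)) 1).map
        (fun i => PySem.List.pyGetD (PySem.List.pyGetD arr i []) r "")))
      = Hcol arr acc r := by
  have hne : ((PySem.List.pyRange 0 ((arr.length : Int)) 1).map
      (fun i => PySem.List.pyGetD (PySem.List.pyGetD arr i []) r "")) ≠ [] := by
    apply List.ne_nil_of_length_pos
    simp [PySem.List.length_pyRange_one]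
    omega
  unfold longest_run Hcol lineVal
  rw [lrun_go_eq, if_neg hne]
  have := S_pos (flags ((PySem.List.pyRange 0 ((arr.length : Int)) 1).map
      (fun i => PySem.List.pyGetD (PySem.List.pyGetD arr i []) r ""))) 1
  omega

theorem checkB_char (arr : List (List String)) (row_s row_e col_s col_e : Int)
    (hn : 0 < arr.length)
    (hrow : ∀ r ∈ PySem.List.pyRange row_s (row_e + 1) 1,
      arr.length ≤ (PySem.List.pyGetD arr r []).length) :
    check_alt arr row_s row_e col_s col_e
      = (PySem.List.pyRange col_s (col_e + 1) 1).foldl (Hcol arr)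
          ((PySem.List.pyRange row_s (row_e + 1) 1).foldl (Hrow arr) 1) := by
  unfold check_alt
  simp only [PySem.List.len_eq]
  rw [if_pos (by exact_mod_cast hn)]
  have h1 := foldl_congr_inv (PySem.List.pyRange row_s (row_e + 1) 1)
    (fun best r => max best (longest_run (PySem.List.slice (PySem.List.pyGetD arr r []) none
        (some ((arr.length : Int))))))
    (Hrow arr) 1 le_rfl
    (fun acc r hr _ => B_row_step arr r hn (hrow r hr) acc)
    (Hrow_inv arr)
  rw [h1]
  have hm : 1 ≤ (PySem.List.pyRange row_s (row_e + 1) 1).foldl (Hrow arr) 1 :=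
    foldl_inv _ _ 1 le_rfl (Hrow_inv arr)
  have h2 := foldl_congr_inv (PySem.List.pyRange col_s (col_e + 1) 1)
    (fun best r => max best (longest_run ((PySem.List.pyRange 0 ((arr.length : Int)) 1).map
        (fun i => PySem.List.pyGetD (PySem.List.pyGetD arr i []) r ""))))
    (Hcol arr) _ hm
    (fun acc r _ _ => B_col_step arr r hn acc)
    (Hcol_inv arr)
  rw [h2]

-- ===== VERDICT (by name: the statement is the Claim_ definition above) =====
theorem check_spec : Claim_equal_check := by
  intro arr row_s row_e col_s col_e _hdom hpre
  unfold Spec_check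
  by_cases harr : arr = []
  · subst harr
    unfold check check_alt
    simp only [PySem.List.len_eq, List.length_nil, Nat.cast_zero,
      PySem.List.pyRange_one_eq_nil (show (0 : Int) ≤ 1 by omega), List.foldl_nil]
    rw [if_neg (by omega : ¬ (0 : Int) < 0)]
    rw [foldl_id, foldl_id]
  · have hn : 0 < arr.length := List.length_pos_of_ne_nil harr
    rcases hpre with h | ⟨hbnd, hlen, _hcol⟩
    · exact absurd h harr
    · refine Eq.trans (checkA_char arr row_s row_e col_s col_e)
        (checkB_char arr row_s row_e col_s col_e hn ?_).symm
      intro r hr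
      have hmem := (PySem.List.mem_pyRange_one).mp hr
      have hb : -(arr.length : Int) ≤ row_s ∧ row_e < (arr.length : Int) := by
        rcases hbnd with h | h
        · omega
        · exact h
      exact hlen r ((PySem.List.mem_pyRange_one).mpr ⟨by omega, by omega⟩)
        (by omega) (by omega)
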